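-- pv_equiv track=rewrite | github.com/zachlunte/Python-Samples | magic.py | getSmallestLarger
-- ===== SOURCE A (Python) =====
-- def getSmallestLarger(x, a):
--     if len(a) == 0:
--         return None
--     else:
--         sl = max(a)
--         if sl <= x:
--             return None
--         else:
--             for e in a:
--                 if e > x and e < sl:
--                     sl = e
--         return sl
-- ===== SOURCE B (Python) =====
-- def getSmallestLarger(x, a):
--     candidates = [e for e in a if e > x]
--     return min(candidates) if candidates else None
-- ===== Notes on version B (the rewrite author's own statement) =====
-- stated objective: simpler
-- what changed: Replaces A's max-seed plus conditional-narrowing loop (two passes with a mutable bound) by a single filter of the elements larger than x followed by a plain min reduction, with one uniform None case.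
import Mathlib
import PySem

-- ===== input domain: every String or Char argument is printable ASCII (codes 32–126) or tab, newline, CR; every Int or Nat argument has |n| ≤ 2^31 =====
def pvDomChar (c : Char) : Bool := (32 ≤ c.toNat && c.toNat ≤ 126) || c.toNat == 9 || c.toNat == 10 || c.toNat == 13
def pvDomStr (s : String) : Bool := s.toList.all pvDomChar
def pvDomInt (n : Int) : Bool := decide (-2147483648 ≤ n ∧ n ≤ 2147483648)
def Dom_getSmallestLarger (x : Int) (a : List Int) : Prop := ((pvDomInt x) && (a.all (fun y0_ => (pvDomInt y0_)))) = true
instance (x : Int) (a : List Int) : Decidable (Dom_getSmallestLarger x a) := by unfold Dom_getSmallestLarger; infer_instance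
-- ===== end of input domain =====

-- B replaces A's max-seed/narrowing loop by filter-then-min (objective: simpler).

-- ===== PORT A =====
def getSmallestLarger (x : Int) (a : List Int) : Option Int :=
  if a.length = 0 then none
  else
    match PySem.List.max? a (fun y => y) with
    | none => none
    | some sl0 =>
      if sl0 ≤ x then none
      else some (a.foldl (fun sl e => if x < e ∧ e < sl then e else sl) sl0)

-- ===== PORT B =====
def getSmallestLarger_alt (x : Int) (a : List Int) : Option Int :=
  let candidates := a.filter (fun e => decide (x < e))
  if candidates.isEmpty then none
  else PySem.List.min? candidates (fun y => y)

-- ===== PRECONDITION & SPEC =====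
def Spec_getSmallestLarger (x : Int) (a : List Int) (out : Option Int) : Prop := out = getSmallestLarger_alt x a
instance (x : Int) (a : List Int) (out : Option Int) : Decidable (Spec_getSmallestLarger x a out) := by unfold Spec_getSmallestLarger; infer_instance

-- ===== CLAIM (what is proved, stated in full; the proofs are below) =====
def Claim_equal_getSmallestLarger : Prop := ∀ (x : Int) (a : List Int), Dom_getSmallestLarger x a → Spec_getSmallestLarger x a (getSmallestLarger x a)

-- ===== LEMMAS AND PROOFS =====

-- A's narrowing loop, seeded with any s with x < s, computes a running min over the filtered list.
theorem pv_fold_filter (x : Int) (l : List Int) (s : Int) (hs : x < s) :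
    l.foldl (fun sl e => if x < e ∧ e < sl then e else sl) s
      = (l.filter (fun e => decide (x < e))).foldl min s := by
  induction l generalizing s with
  | nil => rfl
  | cons e t ih =>
    rw [List.foldl_cons]
    by_cases he : x < e
    · have hf : (e :: t).filter (fun e => decide (x < e))
          = e :: t.filter (fun e => decide (x < e)) := by
        simp [he]
      rw [hf, List.foldl_cons]
      by_cases hlt : e < s
      · rw [if_pos ⟨he, hlt⟩, ih e he]; congr 1; omega
      · rw [if_neg (fun hc => hlt hc.2), ih s hs]; congr 1; omega
    · have hf : (e :: t).filter (fun e => decide (x < e))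
          = t.filter (fun e => decide (x < e)) := by
        simp [he]
      rw [hf, if_neg (fun hc => he hc.1)]
      exact ih s hs

-- ===== VERDICT (by name: the statement is the Claim_ definition above) =====
theorem getSmallestLarger_spec : Claim_equal_getSmallestLarger := by
  intro x a _
  unfold Spec_getSmallestLarger getSmallestLarger getSmallestLarger_alt
  cases a with
  | nil => simp
  | cons h t =>
    have hmax : PySem.List.max? (h :: t) (fun y => y) = some (t.foldl max h) :=
      PySem.List.max?_id_cons h t
    set m := t.foldl max h with hm
    have hub : ∀ y ∈ h :: t, y ≤ m := by
      intro y hy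
      simpa using PySem.List.max?_isMax hmax y hy
    have hmem : m ∈ h :: t := PySem.List.max?_mem hmax
    rw [if_neg (by simp : ¬((h :: t).length = 0)), hmax]
    dsimp only
    by_cases hx : m ≤ x
    · have hfil : (h :: t).filter (fun e => decide (x < e)) = [] := by
        rw [List.filter_eq_nil_iff]
        intro e he
        have := hub e he
        simp only [decide_eq_true_eq]
        omega
      rw [if_pos hx, hfil]
      rfl
    · rw [if_neg hx]
      have hx' : x < m := by omega
      have hmfil : m ∈ (h :: t).filter (fun e => decide (x < e)) := by
        rw [List.mem_filter]
        exact ⟨hmem, by simpa using hx'⟩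
      obtain ⟨c, cs, hcc⟩ := List.exists_cons_of_ne_nil (List.ne_nil_of_mem hmfil)
      have hcm : c ≤ m := by
        refine hub c (List.mem_of_mem_filter (p := fun e => decide (x < e)) ?_)
        rw [hcc]; exact List.mem_cons_self
      rw [pv_fold_filter x (h :: t) m hx', hcc, List.foldl_cons, min_eq_right hcm]
      rw [show (c :: cs).isEmpty = false from rfl]
      rw [if_neg (by simp), PySem.List.min?_id_cons]
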